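-- pv_equiv track=rewrite | github.com/Tianyi-Billy-Ma/N-MARS | src/n_mars/inference/decoder.py | stack_postprocess
-- ===== SOURCE A (Python) =====
-- def stack_postprocess(tokens: list[int], undo_token_id: int) -> list[int]:
--     """Stack-based post-processing: push normal tokens, pop on <UNDO>.
--
--     Args:
--         tokens: Raw token ID sequence from the model.
--         undo_token_id: Token ID of the <UNDO> special token.
--
--     Returns:
--         Final semantic token sequence with undone tokens removed.
--     """
--     stack: list[int] = []
--     for tok in tokens:
--         if tok == undo_token_id:
--             if stack:
--                 stack.pop()
--         else:
--             stack.append(tok)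
--     return stack
-- ===== SOURCE B (Python) =====
-- def stack_postprocess(tokens: list[int], undo_token_id: int) -> list[int]:
--     """Reverse scan with a pending-undo counter instead of a stack."""
--     pending = 0
--     out: list[int] = []
--     for tok in reversed(tokens):
--         if tok == undo_token_id:
--             pending += 1
--         elif pending > 0:
--             pending -= 1
--         else:
--             out.append(tok)
--     out.reverse()
--     return out
-- ===== Notes on version B (the rewrite author's own statement) =====
-- stated objective: alternative
-- what changed: Replaces the forward stack (push/pop) with a single reverse pass keeping only an integer counter of pending undos, appending surviving tokens and reversing at the end.
import Mathlib
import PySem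

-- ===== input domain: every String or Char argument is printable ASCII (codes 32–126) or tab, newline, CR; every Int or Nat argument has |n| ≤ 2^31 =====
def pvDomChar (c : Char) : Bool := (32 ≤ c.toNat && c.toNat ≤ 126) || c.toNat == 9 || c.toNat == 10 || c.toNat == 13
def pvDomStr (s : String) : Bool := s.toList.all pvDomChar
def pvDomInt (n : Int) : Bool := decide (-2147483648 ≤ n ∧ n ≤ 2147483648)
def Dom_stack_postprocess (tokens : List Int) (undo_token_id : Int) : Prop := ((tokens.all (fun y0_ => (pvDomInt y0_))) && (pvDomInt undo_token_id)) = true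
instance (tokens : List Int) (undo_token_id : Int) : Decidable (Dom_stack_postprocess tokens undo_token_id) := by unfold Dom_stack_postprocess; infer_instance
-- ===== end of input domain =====

-- B replaces A's forward push/pop stack by a reverse pass with a pending-undo counter (alternative decomposition, same cost).


-- ===== PORT A =====
-- literal port: stack list, append on normal token, pop (dropLast) on undo if nonempty
def stack_postprocess (tokens : List Int) (undo_token_id : Int) : List Int :=
  tokens.foldl (fun stack tok =>
    if tok = undo_token_id then
      (if stack ≠ [] then stack.dropLast else stack)
    else stack ++ [tok]) []

-- ===== PORT B =====
-- literal port of Source B: reverse iteration, pending counter, append survivors, reverse at the end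
def stack_postprocess_alt (tokens : List Int) (undo_token_id : Int) : List Int :=
  let st := tokens.reverse.foldl (fun (st : Nat × List Int) tok =>
    if tok = undo_token_id then (st.1 + 1, st.2)
    else if st.1 > 0 then (st.1 - 1, st.2)
    else (st.1, st.2 ++ [tok])) (0, [])
  st.2.reverse

-- ===== PRECONDITION & SPEC =====
def Spec_stack_postprocess (tokens : List Int) (undo_token_id : Int) (out : List Int) : Prop := out = stack_postprocess_alt tokens undo_token_id
instance (tokens : List Int) (undo_token_id : Int) (out : List Int) : Decidable (Spec_stack_postprocess tokens undo_token_id out) := by unfold Spec_stack_postprocess; infer_instance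

-- ===== CLAIM (what is proved, stated in full; the proofs are below) =====
def Claim_equal_stack_postprocess : Prop := ∀ (tokens : List Int) (undo_token_id : Int), Dom_stack_postprocess tokens undo_token_id → Spec_stack_postprocess tokens undo_token_id (stack_postprocess tokens undo_token_id)

-- ===== LEMMAS AND PROOFS =====

-- reference recursion: (pending undos left unmatched, forward surviving tokens) of a suffix
def pvFK (undo : Int) : List Int → Nat × List Int
  | [] => (0, [])
  | t :: ts =>
    let p := pvFK undo ts
    if t = undo then (p.1 + 1, p.2)
    else if p.1 > 0 then (p.1 - 1, p.2) else (p.1, t :: p.2)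

-- A's fold started from any stack s: the counter pops min(k, |s|) trailing elements, then F is appended
theorem pvA_char (undo : Int) (ts : List Int) : ∀ s : List Int,
    ts.foldl (fun stack tok =>
      if tok = undo then (if stack ≠ [] then stack.dropLast else stack)
      else stack ++ [tok]) s
    = s.take (s.length - (pvFK undo ts).1) ++ (pvFK undo ts).2 := by
  induction ts with
  | nil => intro s; simp [pvFK]
  | cons t ts ih =>
    intro s
    simp only [List.foldl_cons]
    rw [ih]
    by_cases ht : t = undo
    · by_cases hs : s = (([] : List Int))
      · subst hs
        simp [pvFK, ht]
      · simp only [pvFK, ht, hs, ne_eq, not_false_iff, if_pos]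
        congr 1
        rw [List.dropLast_eq_take, List.length_take, List.take_take]
        congr 1
        have : s.length ≠ 0 := by simpa [List.length_eq_zero_iff] using hs
        omega
    · by_cases hk : (pvFK undo ts).1 > 0
      · simp only [pvFK, if_neg ht, if_pos hk]
        congr 1
        have h1 : (s ++ [t]).length - (pvFK undo ts).1 ≤ s.length := by
          simp; omega
        rw [List.take_append_of_le_length h1]
        congr 1
        simp; omega
      · have hk0 : (pvFK undo ts).1 = 0 := by omega
        simp only [pvFK, if_neg ht, hk0]
        simp [List.take_append]

-- B's reverse fold computes (counter, reversed survivors) of pvFK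
theorem pvB_char (undo : Int) (ts : List Int) :
    ts.reverse.foldl (fun (st : Nat × List Int) tok =>
      if tok = undo then (st.1 + 1, st.2)
      else if st.1 > 0 then (st.1 - 1, st.2)
      else (st.1, st.2 ++ [tok])) (0, [])
    = ((pvFK undo ts).1, (pvFK undo ts).2.reverse) := by
  induction ts with
  | nil => simp [pvFK]
  | cons t ts ih =>
    simp only [List.reverse_cons, List.foldl_append, ih, List.foldl_cons, List.foldl_nil]
    by_cases ht : t = undo
    · simp [pvFK, ht]
    · by_cases hk : (pvFK undo ts).1 > 0
      · simp [pvFK, ht, hk]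
      · have hk0 : (pvFK undo ts).1 = 0 := by omega
        simp [pvFK, ht, hk0]

-- ===== VERDICT (by name: the statement is the Claim_ definition above) =====
theorem stack_postprocess_spec : Claim_equal_stack_postprocess := by
  intro tokens undo _
  unfold Spec_stack_postprocess stack_postprocess stack_postprocess_alt
  rw [pvA_char undo tokens [], pvB_char undo tokens]
  simp
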